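-- pv_equiv track=rewrite | github.com/SakuraMathcraft/LaTeXSnipper | src/core/mathcraft_tex_exporter.py | _remove_extra_closing_braces
-- ===== SOURCE A (Python) =====
-- def _remove_extra_closing_braces(text: str) -> str:
--     depth = 0
--     result: list[str] = []
--     for idx, ch in enumerate(text):
--         if ch == "{" and not _is_escaped_at(text, idx):
--             depth += 1
--             result.append(ch)
--             continue
--         if ch == "}" and not _is_escaped_at(text, idx):
--             if depth <= 0:
--                 continue
--             depth -= 1
--             result.append(ch)
--             continue
--         result.append(ch)
--     return "".join(result)
--
-- def _is_escaped_at(text: str, idx: int) -> bool: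
--     slash_count = 0
--     pos = idx - 1
--     while pos >= 0 and text[pos] == "\\":
--         slash_count += 1
--         pos -= 1
--     return slash_count % 2 == 1
-- ===== SOURCE B (Python) =====
-- def _remove_extra_closing_braces(text: str) -> str:
--     # Single pass: track parity of the current run of preceding backslashes,
--     # instead of rescanning backwards at every brace.
--     depth = 0
--     escaped = False  # is the current character escaped?
--     out = []
--     for ch in text:
--         if ch == "{" and not escaped:
--             depth += 1
--             out.append(ch)
--         elif ch == "}" and not escaped:
--             if depth > 0:
--                 depth -= 1
--                 out.append(ch)
--         else:
--             out.append(ch)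
--         escaped = (ch == "\\") and not escaped
--     return "".join(out)
-- ===== Notes on version B (the rewrite author's own statement) =====
-- stated objective: alternative
-- what changed: B makes one forward pass keeping the parity of the current backslash run as a boolean, removing A's backward rescan of backslashes at every brace; it trades the rescan (quadratic on long backslash runs) for constant per-character state.
import Mathlib
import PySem

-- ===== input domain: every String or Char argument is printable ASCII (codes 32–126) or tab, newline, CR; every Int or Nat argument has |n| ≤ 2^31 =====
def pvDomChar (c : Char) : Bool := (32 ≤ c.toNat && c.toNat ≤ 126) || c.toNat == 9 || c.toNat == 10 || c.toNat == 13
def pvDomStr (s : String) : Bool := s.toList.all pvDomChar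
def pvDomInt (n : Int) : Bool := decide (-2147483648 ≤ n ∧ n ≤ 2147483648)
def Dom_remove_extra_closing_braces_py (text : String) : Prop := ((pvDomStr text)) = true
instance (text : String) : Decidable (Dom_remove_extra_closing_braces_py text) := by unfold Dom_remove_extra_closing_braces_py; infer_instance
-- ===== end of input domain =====

-- B replaces A's backward rescan of backslashes at every brace by a running boolean
-- carrying the parity of the current backslash run (objective: alternative).

-- ===== PORT A =====
-- _is_escaped_at's while loop: counts the run of consecutive backslashes ending just
-- before index idx (structural on idx; text[pos] is in range in Python, so getD is exact).
def slashRunBefore (cs : List Char) : Nat → Nat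
  | 0 => 0
  | n + 1 => if cs.getD n ' ' = '\\' then slashRunBefore cs n + 1 else 0

def isEscapedAt (cs : List Char) (idx : Nat) : Bool := slashRunBefore cs idx % 2 == 1

def stepA (cs : List Char) (st : Int × List Char) (p : Int × Char) : Int × List Char :=
  let depth := st.1; let result := st.2; let idx := p.1; let ch := p.2
  if ch = '{' ∧ isEscapedAt cs idx.toNat = false then (depth + 1, result ++ [ch])
  else if ch = '}' ∧ isEscapedAt cs idx.toNat = false then
    (if depth ≤ 0 then (depth, result) else (depth - 1, result ++ [ch]))
  else (depth, result ++ [ch])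

def remove_extra_closing_braces_py (text : String) : String :=
  String.mk ((PySem.List.enumerate text.toList 0).foldl (stepA text.toList) (0, [])).2

-- ===== PORT B =====
def stepB (st : Int × Bool × List Char) (ch : Char) : Int × Bool × List Char :=
  let depth := st.1; let escaped := st.2.1; let out := st.2.2
  let next :=
    if ch = '{' ∧ escaped = false then (depth + 1, out ++ [ch])
    else if ch = '}' ∧ escaped = false then
      (if depth > 0 then (depth - 1, out ++ [ch]) else (depth, out))
    else (depth, out ++ [ch])
  (next.1, decide (ch = '\\') && !escaped, next.2)

def remove_extra_closing_braces_py_alt (text : String) : String :=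
  String.mk (text.toList.foldl stepB (0, false, [])).2.2

-- ===== PRECONDITION & SPEC =====
def Spec_remove_extra_closing_braces_py (text : String) (out : String) : Prop := out = remove_extra_closing_braces_py_alt text
instance (text : String) (out : String) : Decidable (Spec_remove_extra_closing_braces_py text out) := by unfold Spec_remove_extra_closing_braces_py; infer_instance

-- ===== CLAIM (what is proved, stated in full; the proofs are below) =====
def Claim_equal_remove_extra_closing_braces_py : Prop := ∀ (text : String), Dom_remove_extra_closing_braces_py text → Spec_remove_extra_closing_braces_py text (remove_extra_closing_braces_py text)

-- ===== LEMMAS AND PROOFS =====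

-- B's running escape flag agrees with A's backward rescan at the next index.
lemma isEscapedAt_succ (cs : List Char) (i : Nat) (ch : Char) (h : cs[i]? = some ch) :
    isEscapedAt cs (i + 1) = (decide (ch = '\\') && !(isEscapedAt cs i)) := by
  have hg : cs.getD i ' ' = ch := by simp [List.getD_eq_getElem?_getD, h]
  have hrun : slashRunBefore cs (i + 1) = if ch = '\\' then slashRunBefore cs i + 1 else 0 := by
    rw [show slashRunBefore cs (i + 1)
          = if cs.getD i ' ' = '\\' then slashRunBefore cs i + 1 else 0 from rfl, hg]
  by_cases hc : ch = '\\'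
  · rw [isEscapedAt, hrun, if_pos hc]
    rcases Nat.mod_two_eq_zero_or_one (slashRunBefore cs i) with h2 | h2 <;>
      simp [isEscapedAt, Nat.add_mod, h2, hc]
  · simp [isEscapedAt, hrun, hc]

-- main loop correspondence
lemma loop_eq (cs : List Char) : ∀ (suf : List Char) (i : Nat) (depth : Int) (res : List Char),
    suf = cs.drop i → 0 ≤ depth →
    (PySem.List.enumerate suf (i : Int)).foldl (stepA cs) (depth, res) =
      ((suf.foldl stepB (depth, isEscapedAt cs i, res)).1,
       (suf.foldl stepB (depth, isEscapedAt cs i, res)).2.2) := by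
  intro suf
  induction suf with
  | nil => intro i depth res _ _; simp [PySem.List.enumerate]
  | cons ch suf' ih =>
    intro i depth res hdrop hd
    have hget : cs[i]? = some ch := by
      have h0 : (cs.drop i)[0]? = some ch := by rw [← hdrop]; rfl
      simpa using h0
    have hsuf' : suf' = cs.drop (i + 1) := by
      have h1 := congrArg (List.drop 1) hdrop
      simpa [List.drop_drop, Nat.add_comm] using h1
    rw [PySem.List.enumerate_cons]
    have hcast : (i : Int) + 1 = ((i + 1 : Nat) : Int) := by push_cast; ring
    rw [List.foldl_cons, List.foldl_cons, hcast]
    have hesc : isEscapedAt cs ((i : Int)).toNat = isEscapedAt cs i := by simp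
    have hesc' := isEscapedAt_succ cs i ch hget
    -- unfold one step on both sides, case on the character
    by_cases h1 : ch = '{' ∧ isEscapedAt cs i = false
    · have hA : stepA cs (depth, res) ((i : Int), ch) = (depth + 1, res ++ [ch]) := by
        simp [stepA, h1.1, h1.2]
      have hB : stepB (depth, isEscapedAt cs i, res) ch =
          (depth + 1, isEscapedAt cs (i + 1), res ++ [ch]) := by
        simp [stepB, h1.1, h1.2, hesc']
      rw [hA, hB]
      exact ih (i + 1) (depth + 1) (res ++ [ch]) hsuf' (by omega)
    · by_cases h2 : ch = '}' ∧ isEscapedAt cs i = false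
      · by_cases h3 : depth ≤ 0
        · have hA : stepA cs (depth, res) ((i : Int), ch) = (depth, res) := by
            simp [stepA, h2.1, h2.2, h3]
          have hB : stepB (depth, isEscapedAt cs i, res) ch =
              (depth, isEscapedAt cs (i + 1), res) := by
            have hdp : ¬ depth > 0 := by omega
            simp [stepB, h2.1, h2.2, hdp, hesc']
          rw [hA, hB]
          exact ih (i + 1) depth res hsuf' hd
        · have hA : stepA cs (depth, res) ((i : Int), ch) = (depth - 1, res ++ [ch]) := by
            simp [stepA, h2.1, h2.2, h3]
          have hB : stepB (depth, isEscapedAt cs i, res) ch =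
              (depth - 1, isEscapedAt cs (i + 1), res ++ [ch]) := by
            have hdp : depth > 0 := by omega
            simp [stepB, h2.1, h2.2, hdp, hesc']
          rw [hA, hB]
          exact ih (i + 1) (depth - 1) (res ++ [ch]) hsuf' (by omega)
      · have hA : stepA cs (depth, res) ((i : Int), ch) = (depth, res ++ [ch]) := by
          simp only [stepA, hesc]
          rw [if_neg h1, if_neg h2]
        have hB : stepB (depth, isEscapedAt cs i, res) ch =
            (depth, isEscapedAt cs (i + 1), res ++ [ch]) := by
          simp only [stepB, hesc']
          rw [if_neg h1, if_neg h2]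
        rw [hA, hB]
        exact ih (i + 1) depth (res ++ [ch]) hsuf' hd

-- ===== VERDICT (by name: the statement is the Claim_ definition above) =====
theorem remove_extra_closing_braces_py_spec : Claim_equal_remove_extra_closing_braces_py := by
  intro text _
  unfold Spec_remove_extra_closing_braces_py
  unfold remove_extra_closing_braces_py remove_extra_closing_braces_py_alt
  have h := loop_eq text.toList text.toList 0 0 [] (by simp) (by norm_num)
  have h0 : isEscapedAt text.toList 0 = false := by simp [isEscapedAt, slashRunBefore]
  rw [h0] at h
  simp only [Nat.cast_zero] at h
  rw [h]
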